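-- pv_equiv track=rewrite | github.com/Denn44ikk/VED_final | src/app/utils/document_processing.py | _common_heading_path
-- ===== SOURCE A (Python) =====
-- def _common_heading_path(paths: list[list[str]]) -> list[str]:
--     nonempty_paths = [list(path) for path in paths if path]
--     if not nonempty_paths:
--         return []
--
--     prefix = nonempty_paths[0]
--     for path in nonempty_paths[1:]:
--         limit = min(len(prefix), len(path))
--         index = 0
--         while index < limit and prefix[index] == path[index]:
--             index += 1
--         prefix = prefix[:index]
--         if not prefix:
--             break
--     return prefix
-- ===== SOURCE B (Python) =====
-- def _common_heading_path(paths: list[list[str]]) -> list[str]: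
--     nonempty = [p for p in paths if p]
--     if not nonempty:
--         return []
--     first = nonempty[0]
--     m = min(len(p) for p in nonempty)
--     result = []
--     for i in range(m):
--         ch = first[i]
--         if all(p[i] == ch for p in nonempty):
--             result.append(ch)
--         else:
--             break
--     return result
-- ===== Notes on version B (the rewrite author's own statement) =====
-- stated objective: alternative
-- what changed: Replaced pairwise prefix-shrinking over successive paths by a single column-wise scan: compute the minimum length over all non-empty paths, then extend the result one column at a time while every path agrees with the first path at that column.
import Mathlib
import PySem

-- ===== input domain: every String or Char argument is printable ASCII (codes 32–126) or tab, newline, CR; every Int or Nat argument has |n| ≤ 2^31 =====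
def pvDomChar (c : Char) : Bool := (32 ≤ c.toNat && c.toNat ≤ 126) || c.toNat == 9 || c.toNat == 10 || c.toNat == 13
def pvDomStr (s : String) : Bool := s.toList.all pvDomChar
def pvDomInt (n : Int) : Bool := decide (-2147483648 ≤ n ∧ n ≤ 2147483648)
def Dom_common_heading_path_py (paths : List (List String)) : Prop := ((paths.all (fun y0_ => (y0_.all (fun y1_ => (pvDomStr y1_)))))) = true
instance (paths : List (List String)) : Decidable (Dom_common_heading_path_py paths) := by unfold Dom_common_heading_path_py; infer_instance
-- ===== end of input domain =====

-- B replaces A's pairwise prefix-shrinking with one column-wise scan over all paths (alternative decomposition, same cost).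

-- ===== PORT A =====
-- 'while index < limit and prefix[index] == path[index]: index += 1' (index starts in range, stays ≤ limit ≤ lengths, so getD is exact)
def pvWhileIdx (pre path : List String) (limit index : Nat) : Nat :=
  if _h : index < limit ∧ pre.getD index "" = path.getD index "" then
    pvWhileIdx pre path limit (index + 1)
  else index
termination_by limit - index

-- the 'for path in nonempty_paths[1:]' loop with its 'break' on an empty prefix; prefix[:index] with 0 ≤ index is List.take
def pvALoop : List String → List (List String) → List String
  | pre, [] => pre
  | pre, path :: ps =>
    let limit := min pre.length path.length
    let index := pvWhileIdx pre path limit 0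
    let pre2 := pre.take index
    if pre2.isEmpty then pre2 else pvALoop pre2 ps

-- 'list(path)' only copies; under value semantics the filter alone is exact
def common_heading_path_py (paths : List (List String)) : List String :=
  match paths.filter (fun p => !p.isEmpty) with
  | [] => []
  | pre :: rest => pvALoop pre rest

-- ===== PORT B =====
-- 'for i in range(m): … else break' as a counting loop; i < m ≤ every length, so getD is exact
def pvColLoop (ne : List (List String)) (first : List String) (m : Nat) (i : Nat) (acc : List String) : List String :=
  if _h : i < m then
    let ch := first.getD i ""
    if ne.all (fun p => p.getD i "" == ch) then
      pvColLoop ne first m (i + 1) (acc ++ [ch])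
    else acc
  else acc
termination_by m - i

def common_heading_path_py_alt (paths : List (List String)) : List String :=
  match paths.filter (fun p => !p.isEmpty) with
  | [] => []
  | first :: rest =>
    let m := rest.foldl (fun a p => min a p.length) first.length  -- min(len(p) for p in nonempty)
    pvColLoop (first :: rest) first m 0 []

-- ===== PRECONDITION & SPEC =====
def Spec_common_heading_path_py (paths : List (List String)) (out : List String) : Prop := out = common_heading_path_py_alt paths
instance (paths : List (List String)) (out : List String) : Decidable (Spec_common_heading_path_py paths out) := by unfold Spec_common_heading_path_py; infer_instance

-- ===== CLAIM (what is proved, stated in full; the proofs are below) =====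
def Claim_equal_common_heading_path_py : Prop := ∀ (paths : List (List String)), Dom_common_heading_path_py paths → Spec_common_heading_path_py paths (common_heading_path_py paths)

-- ===== LEMMAS AND PROOFS =====

-- length of the longest common prefix of two paths (proof-side characterisation)
def lcpLen : List String → List String → Nat
  | a :: as, b :: bs => if a = b then lcpLen as bs + 1 else 0
  | _, _ => 0

theorem lcpLen_le_right : ∀ (x y : List String), lcpLen x y ≤ y.length := by
  intro x
  induction x with
  | nil => intro y; cases y <;> simp [lcpLen]
  | cons a as ih =>
    intro y
    cases y with
    | nil => simp [lcpLen]
    | cons b bs =>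
      simp only [lcpLen]
      split
      · simpa using ih bs
      · simp

theorem lcpLen_char : ∀ (i : Nat) (x y : List String), i ≤ lcpLen x y →
    (i < lcpLen x y ↔ i < x.length ∧ i < y.length ∧ x.getD i "" = y.getD i "") := by
  intro i
  induction i with
  | zero =>
    intro x y _
    cases x with
    | nil => simp [lcpLen]
    | cons a as =>
      cases y with
      | nil => simp [lcpLen]
      | cons b bs => by_cases h : a = b <;> simp [lcpLen, h]
  | succ i ih =>
    intro x y hle
    cases x with
    | nil => simp [lcpLen] at hle
    | cons a as =>
      cases y with
      | nil => simp [lcpLen] at hle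
      | cons b bs =>
        by_cases h : a = b
        · simp only [lcpLen, if_pos h] at hle ⊢
          have := ih as bs (by omega)
          simp only [List.length_cons, List.getD_cons_succ]
          constructor
          · intro hlt
            obtain ⟨h1, h2, h3⟩ := this.mp (by omega)
            exact ⟨by omega, by omega, h3⟩
          · intro ⟨h1, h2, h3⟩
            have := this.mpr ⟨by omega, by omega, h3⟩
            omega
        · simp [lcpLen, h] at hle

theorem lcpLen_take : ∀ (x y : List String) (k : Nat), lcpLen (x.take k) y = min k (lcpLen x y) := by
  intro x
  induction x with
  | nil => intro y k; cases y <;> simp [lcpLen]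
  | cons a as ih =>
    intro y k
    cases k with
    | zero => cases y <;> simp [lcpLen]
    | succ k =>
      cases y with
      | nil => simp [lcpLen]
      | cons b bs =>
        by_cases h : a = b
        · simp [lcpLen, h, ih]
        · simp [lcpLen, h]

-- fold-min characterisations
theorem le_foldlMin {α : Type} (g : α → Nat) : ∀ (l : List α) (c i : Nat),
    (i ≤ l.foldl (fun a p => min a (g p)) c ↔ i ≤ c ∧ ∀ p ∈ l, i ≤ g p) := by
  intro l
  induction l with
  | nil => simp
  | cons p ps ih =>
    intro c i
    simp only [List.foldl_cons, ih, List.mem_cons]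
    constructor
    · intro ⟨h1, h2⟩
      exact ⟨by omega, fun q hq => hq.elim (fun e => e ▸ (by omega)) (h2 q)⟩
    · intro ⟨h1, h2⟩
      exact ⟨by have := h2 p (Or.inl rfl); omega, fun q hq => h2 q (Or.inr hq)⟩

theorem lt_foldlMin {α : Type} (g : α → Nat) : ∀ (l : List α) (c i : Nat),
    (i < l.foldl (fun a p => min a (g p)) c ↔ i < c ∧ ∀ p ∈ l, i < g p) := by
  intro l c i
  exact le_foldlMin g l c (i + 1)

theorem foldlMin_zero {α : Type} (g : α → Nat) : ∀ (l : List α),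
    l.foldl (fun a p => min a (g p)) 0 = 0 := by
  intro l
  have := (le_foldlMin g l 0 (l.foldl (fun a p => min a (g p)) 0)).mp (le_refl _)
  omega

-- the transliterated while loop computes lcpLen
theorem pvWhileIdx_eq (x y : List String) : ∀ (i : Nat), i ≤ lcpLen x y →
    pvWhileIdx x y (min x.length y.length) i = lcpLen x y := by
  intro i
  induction hk : lcpLen x y - i generalizing i with
  | zero =>
    intro hle
    have hi : i = lcpLen x y := by omega
    rw [pvWhileIdx]
    rw [dif_neg]
    · exact hi
    · intro ⟨h1, h2⟩
      have := (lcpLen_char i x y hle).mpr ⟨by omega, by omega, h2⟩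
      omega
  | succ k ih =>
    intro hle
    have hlt : i < lcpLen x y := by omega
    have hc := (lcpLen_char i x y hle).mp hlt
    rw [pvWhileIdx]
    rw [dif_pos ⟨by omega, hc.2.2⟩]
    exact ih (i + 1) (by omega) (by omega)

-- A's fold, in closed form: repeated pairwise shrinking is take of a running min of lcpLen
theorem pvALoop_take (x : List String) : ∀ (l : List (List String)) (k : Nat),
    pvALoop (x.take k) l = x.take (l.foldl (fun a p => min a (lcpLen x p)) k) := by
  intro l
  induction l with
  | nil => intro k; simp [pvALoop]
  | cons p ps ih =>
    intro k
    simp only [pvALoop]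
    have hw : pvWhileIdx (x.take k) p (min (x.take k).length p.length) 0
        = lcpLen (x.take k) p := pvWhileIdx_eq (x.take k) p 0 (Nat.zero_le _)
    rw [hw, lcpLen_take, List.take_take]
    have hmm : min (min k (lcpLen x p)) k = min k (lcpLen x p) := by omega
    rw [hmm]
    by_cases he : (x.take (min k (lcpLen x p))).isEmpty
    · rw [if_pos he]
      have h := List.isEmpty_iff.mp he
      rcases x with _ | ⟨a, as⟩
      · simp
      · have h0 : min k (lcpLen (a :: as) p) = 0 := by
          by_contra hne
          rw [List.take_eq_nil_iff] at h
          rcases h with h | h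
          · exact hne (by omega)
          · simp at h
        rw [List.foldl_cons, h0, foldlMin_zero]
    · rw [if_neg he, ih (min k (lcpLen x p))]
      simp

theorem take_succ_getD (x : List String) (i : Nat) (h : i < x.length) :
    x.take (i + 1) = x.take i ++ [x.getD i ""] := by
  rw [List.take_add_one]
  congr 1
  rw [List.getElem?_eq_getElem h]
  simp [List.getD, List.getElem?_eq_getElem h]

-- B's column loop computes take of the same running min
theorem pvColLoop_take (first : List String) (rest : List (List String)) :
    ∀ (fuel i : Nat) (acc : List String),
    let m := rest.foldl (fun a p => min a p.length) first.length
    let L := rest.foldl (fun a p => min a (lcpLen first p)) first.length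
    fuel = m - i → i ≤ L → acc = first.take i →
    pvColLoop (first :: rest) first m i acc = first.take L := by
  intro fuel
  induction fuel with
  | zero =>
    intro i acc m L hf hle hacc
    have hLm : L ≤ m := by
      have hL := (le_foldlMin (fun p => lcpLen first p) rest first.length L).mp (le_refl _)
      exact (le_foldlMin (fun p => p.length) rest first.length L).mpr
        ⟨hL.1, fun p hp => le_trans (hL.2 p hp) (lcpLen_le_right first p)⟩
    rw [pvColLoop, dif_neg (by omega)]
    have : i = L := by omega
    rw [hacc, this]
  | succ fuel ih =>
    intro i acc m L hf hle hacc
    by_cases him : i < m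
    · have hmlen := (lt_foldlMin (fun p => p.length) rest first.length i).mp him
      have hlcp := (le_foldlMin (fun p => lcpLen first p) rest first.length i).mp hle
      have hcond : (List.all (first :: rest) (fun p => p.getD i "" == first.getD i "")) = true ↔ i < L := by
        simp only [List.all_cons, List.all_eq_true, beq_iff_eq, Bool.and_eq_true, beq_self_eq_true]
        rw [lt_foldlMin]
        constructor
        · intro ⟨_, h2⟩
          refine ⟨hmlen.1, fun p hp => ?_⟩
          exact (lcpLen_char i first p (hlcp.2 p hp)).mpr ⟨hmlen.1, hmlen.2 p hp, (h2 p hp).symm⟩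
        · intro ⟨h1, h2⟩
          exact ⟨by simp, fun p hp => ((lcpLen_char i first p (hlcp.2 p hp)).mp (h2 p hp)).2.2.symm⟩
      rw [pvColLoop, dif_pos him]
      by_cases hiL : i < L
      · rw [if_pos (hcond.mpr hiL)]
        exact ih (i + 1) (acc ++ [first.getD i ""]) (by omega) (by omega)
          (by rw [hacc, ← take_succ_getD first i hmlen.1])
      · rw [if_neg (by simp only [hcond]; omega)]
        have : i = L := by omega
        rw [hacc, this]
    · have hLm : L ≤ m := by
        have hL := (le_foldlMin (fun p => lcpLen first p) rest first.length L).mp (le_refl _)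
        exact (le_foldlMin (fun p => p.length) rest first.length L).mpr
          ⟨hL.1, fun p hp => le_trans (hL.2 p hp) (lcpLen_le_right first p)⟩
      rw [pvColLoop, dif_neg him]
      have : i = L := by omega
      rw [hacc, this]

-- ===== VERDICT (by name: the statement is the Claim_ definition above) =====
theorem common_heading_path_py_spec : Claim_equal_common_heading_path_py := by
  intro paths _
  unfold Spec_common_heading_path_py common_heading_path_py common_heading_path_py_alt
  cases hf : paths.filter (fun p => !p.isEmpty) with
  | nil => rfl
  | cons first rest =>
    have hA : pvALoop first rest
        = first.take (rest.foldl (fun a p => min a (lcpLen first p)) first.length) := by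
      have := pvALoop_take first rest first.length
      rwa [List.take_length] at this
    have hB := pvColLoop_take first rest
      ((rest.foldl (fun a p => min a p.length) first.length)
        - 0) 0 [] rfl (Nat.zero_le _) (by simp)
    show pvALoop first rest
        = pvColLoop (first :: rest) first (rest.foldl (fun a p => min a p.length) first.length) 0 []
    rw [hA, hB]
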